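-- pv_equiv track=rewrite | github.com/ProjectAlita/alita-sdk | alita_sdk/community/inventory/parsers/rust_parser.py | _find_preceding_doc
-- ===== SOURCE A (Python) =====
-- from typing import Dict, List, Optional, Set, Tuple
--
-- def _find_preceding_doc(content: str, position: int) -> Optional[str]:
--     """Find doc comment preceding a position."""
--     before = content[:position]
--     lines = before.split('\n')
--
--     # Look for /// comments in preceding lines
--     doc_lines = []
--     for line in reversed(lines[:-1]):  # Skip current line
--         stripped = line.strip()
--         if stripped.startswith('///'):
--             doc_lines.insert(0, stripped[3:].strip())
--         elif stripped.startswith('#['):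
--             # Skip attributes
--             continue
--         elif stripped == '':
--             continue
--         else:
--             break
--
--     return '\n'.join(doc_lines) if doc_lines else None
-- ===== SOURCE B (Python) =====
-- def _find_preceding_doc(content, position):
--     """Find doc comment preceding a position."""
--     lines = content[:position].split('\n')[:-1]  # skip current line
--     # Forward pass: count how many trailing lines may belong to a doc block.
--     keep = 0
--     for line in lines:
--         s = line.strip()
--         if s and not s.startswith('///') and not s.startswith('#['):
--             keep = 0
--         else:
--             keep += 1
--     docs = [l.strip()[3:].strip() for l in lines[len(lines) - keep:]
--             if l.strip().startswith('///')]
--     return '\n'.join(docs) if docs else None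
-- ===== Notes on version B (the rewrite author's own statement) =====
-- stated objective: alternative
-- what changed: Replaces A's backward reversed() scan with break and insert(0) prepends by a staged forward algorithm: one pass counting how many trailing lines may belong to a doc block, then a slice of that suffix and a single comprehension extracting the doc text.
import Mathlib
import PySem

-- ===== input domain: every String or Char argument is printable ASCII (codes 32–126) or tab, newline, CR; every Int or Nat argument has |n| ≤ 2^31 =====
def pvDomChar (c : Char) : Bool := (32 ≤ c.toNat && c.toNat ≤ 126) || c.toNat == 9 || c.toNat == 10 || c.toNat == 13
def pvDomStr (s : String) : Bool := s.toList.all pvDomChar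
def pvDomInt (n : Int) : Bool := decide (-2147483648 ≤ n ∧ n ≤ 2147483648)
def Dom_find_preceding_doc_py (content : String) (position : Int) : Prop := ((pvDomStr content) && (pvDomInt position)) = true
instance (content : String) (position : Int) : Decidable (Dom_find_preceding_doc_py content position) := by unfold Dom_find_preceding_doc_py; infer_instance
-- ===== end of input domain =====

-- B replaces A's backward scan (reversed() with break and insert(0) prepends, classifying each
-- line into one of four branches) by a staged forward algorithm: one fold counting the length
-- of the trailing acceptable suffix, then a slice and one comprehension extracting the doc text.

-- ===== PORT A =====
-- A's loop over reversed(lines[:-1]): doc_lines is the accumulator, insert(0, x) is x :: acc,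
-- 'break' returns the accumulator.
def pvGoA (lines : List (List Char)) (acc : List (List Char)) : List (List Char) :=
  match lines with
  | [] => acc
  | l :: ls =>
    let stripped := PySem.Chars.strip l
    if PySem.Chars.startswith stripped "///".toList then
      pvGoA ls (PySem.Chars.strip (PySem.List.slice stripped (some 3) none) :: acc)
    else if PySem.Chars.startswith stripped "#[".toList then
      pvGoA ls acc
    else if stripped = [] then
      pvGoA ls acc
    else acc

def find_preceding_doc_py (content : String) (position : Int) : Option String :=
  let before := PySem.List.slice content.toList none (some position)
  let lines := PySem.Chars.splitOn before ['\n']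
  let doc_lines := pvGoA (lines.dropLast).reverse []
  if doc_lines ≠ [] then some (String.ofList (PySem.Chars.join ['\n'] doc_lines)) else none

-- ===== PORT B =====
-- B's forward loop: keep = 0 on a line that ends a doc block, keep + 1 otherwise.
def pvKeepB (lines : List (List Char)) : Int :=
  lines.foldl (fun k l =>
    let s := PySem.Chars.strip l
    if !s.isEmpty && !PySem.Chars.startswith s "///".toList
        && !PySem.Chars.startswith s "#[".toList then 0 else k + 1) 0

def find_preceding_doc_py_alt (content : String) (position : Int) : Option String :=
  let lines := (PySem.Chars.splitOn (PySem.List.slice content.toList none (some position)) ['\n']).dropLast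
  let docs :=
    ((PySem.List.slice lines (some ((lines.length : Int) - pvKeepB lines)) none).filter
        (fun l => PySem.Chars.startswith (PySem.Chars.strip l) "///".toList)).map
      (fun l => PySem.Chars.strip (PySem.List.slice (PySem.Chars.strip l) (some 3) none))
  if docs ≠ [] then some (String.ofList (PySem.Chars.join ['\n'] docs)) else none

-- ===== PRECONDITION & SPEC =====
def Spec_find_preceding_doc_py (content : String) (position : Int) (out : Option String) : Prop := out = find_preceding_doc_py_alt content position
instance (content : String) (position : Int) (out : Option String) : Decidable (Spec_find_preceding_doc_py content position out) := by unfold Spec_find_preceding_doc_py; infer_instance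

-- ===== CLAIM (what is proved, stated in full; the proofs are below) =====
def Claim_equal_find_preceding_doc_py : Prop := ∀ (content : String) (position : Int), Dom_find_preceding_doc_py content position → Spec_find_preceding_doc_py content position (find_preceding_doc_py content position)

-- ===== LEMMAS AND PROOFS =====

-- B's reset test (= A's break branch): the line ends any doc block
def pvBad (y : List Char) : Bool :=
  !(PySem.Chars.strip y).isEmpty
    && !PySem.Chars.startswith (PySem.Chars.strip y) ['/', '/', '/']
    && !PySem.Chars.startswith (PySem.Chars.strip y) ['#', '[']

-- 'line may belong to a doc block'
def pvGoodP (l : List Char) : Bool := !pvBad l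

-- B's doc-extraction stage, as a function of the line block
def pvDocs (block : List (List Char)) : List (List Char) :=
  (block.filter (fun l => PySem.Chars.startswith (PySem.Chars.strip l) "///".toList)).map
    (fun l => PySem.Chars.strip (PySem.List.slice (PySem.Chars.strip l) (some 3) none))

theorem pvDocs_append (xs ys : List (List Char)) :
    pvDocs (xs ++ ys) = pvDocs xs ++ pvDocs ys := by
  simp [pvDocs]

theorem pvKeepB_step (M : List (List Char)) (x : List Char) :
    pvKeepB (M ++ [x]) = if pvBad x then 0 else pvKeepB M + 1 := by
  simp [pvKeepB, pvBad, List.foldl_append]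

-- B's fold computes the length of the maximal good suffix.
theorem pvKeepB_eq (L : List (List Char)) :
    pvKeepB L = ((L.rtakeWhile pvGoodP).length : Int) := by
  induction L using List.reverseRecOn with
  | nil => simp [pvKeepB, List.rtakeWhile_nil]
  | append_singleton M x ih =>
    rw [pvKeepB_step]
    by_cases hb : pvBad x = true
    · rw [if_pos hb, List.rtakeWhile_concat_neg _ _ _ (by simp [pvGoodP, hb])]
      simp
    · have hb' : pvBad x = false := by simpa using hb
      rw [if_neg hb, ih, List.rtakeWhile_concat_pos _ _ _ (by simp [pvGoodP, hb'])]
      simp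

-- A's backward scan collects exactly the doc lines of the maximal good suffix.
theorem pvGoA_eq (R : List (List Char)) :
    ∀ acc, pvGoA R acc = pvDocs (R.takeWhile pvGoodP).reverse ++ acc := by
  induction R with
  | nil => intro acc; simp [pvGoA, pvDocs]
  | cons l R' ih =>
    intro acc
    by_cases h1 : PySem.Chars.startswith (PySem.Chars.strip l) ['/', '/', '/'] = true
    · have hg : pvGoodP l = true := by simp [pvGoodP, pvBad, h1]
      have hdl : pvDocs [l] = [PySem.Chars.strip (PySem.List.slice (PySem.Chars.strip l) (some 3) none)] := by
        simp [pvDocs, h1]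
      rw [show pvGoA (l :: R') acc
            = pvGoA R' (PySem.Chars.strip (PySem.List.slice (PySem.Chars.strip l) (some 3) none) :: acc) by
          simp [pvGoA, h1]]
      rw [ih, List.takeWhile_cons_of_pos hg, List.reverse_cons, pvDocs_append, hdl]
      simp
    · have h1' : PySem.Chars.startswith (PySem.Chars.strip l) ['/', '/', '/'] = false := by
        simpa using h1
      by_cases h2 : PySem.Chars.startswith (PySem.Chars.strip l) ['#', '['] = true
      · have hg : pvGoodP l = true := by simp [pvGoodP, pvBad, h2]
        have hdl : pvDocs [l] = [] := by simp [pvDocs, h1']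
        rw [show pvGoA (l :: R') acc = pvGoA R' acc by simp [pvGoA, h1', h2]]
        rw [ih, List.takeWhile_cons_of_pos hg, List.reverse_cons, pvDocs_append, hdl]
        simp
      · have h2' : PySem.Chars.startswith (PySem.Chars.strip l) ['#', '['] = false := by
          simpa using h2
        by_cases h3 : PySem.Chars.strip l = []
        · have hg : pvGoodP l = true := by simp [pvGoodP, pvBad, h3]
          have hdl : pvDocs [l] = [] := by simp [pvDocs, h1']
          rw [show pvGoA (l :: R') acc = pvGoA R' acc by
            have hsw : PySem.Chars.startswith ([] : List Char) ['/', '/', '/'] = false := by decide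
            simp [pvGoA, h3, hsw]]
          rw [ih, List.takeWhile_cons_of_pos hg, List.reverse_cons, pvDocs_append, hdl]
          simp
        · have hg : pvGoodP l = false := by
            simp [pvGoodP, pvBad, h1', h2', h3]
          rw [show pvGoA (l :: R') acc = acc by simp [pvGoA, h1', h2', h3]]
          rw [List.takeWhile_cons_of_neg (by simp [hg])]
          simp [pvDocs]

-- the maximal good suffix is a suffix, hence equals the drop at length-difference
theorem pvDrop_rtakeWhile (L : List (List Char)) :
    L.drop (L.length - (L.rtakeWhile pvGoodP).length) = L.rtakeWhile pvGoodP := by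
  obtain ⟨t, ht⟩ := List.rtakeWhile_suffix pvGoodP L
  generalize hs : List.rtakeWhile pvGoodP L = s at ht ⊢
  subst ht
  simp

-- ===== VERDICT (by name: the statement is the Claim_ definition above) =====
theorem find_preceding_doc_py_spec : Claim_equal_find_preceding_doc_py := by
  intro content position _
  unfold Spec_find_preceding_doc_py
  simp only [find_preceding_doc_py, find_preceding_doc_py_alt]
  set L := (PySem.Chars.splitOn (PySem.List.slice content.toList none (some position)) ['\n']).dropLast with hL
  have hA : pvGoA L.reverse [] = pvDocs (L.rtakeWhile pvGoodP) := by
    rw [pvGoA_eq, List.append_nil]; rfl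
  have hle : (L.rtakeWhile pvGoodP).length ≤ L.length :=
    (List.rtakeWhile_suffix pvGoodP L).length_le
  have hnn : (0 : Int) ≤ (L.length : Int) - pvKeepB L := by
    rw [pvKeepB_eq]; omega
  have hk : ((L.length : Int) - pvKeepB L).toNat = L.length - (L.rtakeWhile pvGoodP).length := by
    rw [pvKeepB_eq]; omega
  have hs : PySem.List.slice L (some ((L.length : Int) - pvKeepB L)) none = L.rtakeWhile pvGoodP := by
    rw [PySem.List.slice_from _ hnn, hk, pvDrop_rtakeWhile]
  rw [hA, hs]
  rfl
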